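-- pv_equiv track=rewrite | github.com/kloptops/AdventOfCode | 2023/aoc_007.py | trial_hands
-- ===== SOURCE A (Python) =====
-- CARDS_R = '23456789TJQKA'
--
-- def trial_hands(hand):
--     AVAILABLE_CARDS = list(
--         sorted(
--             list(
--                 set(
--                     hand.replace('J', '')
--                     )
--                 ),
--             key=lambda card: CARDS_R.index(card)))
--
--     for card in AVAILABLE_CARDS:
--         yield hand.replace('J', card)
-- ===== SOURCE B (Python) =====
-- CARDS_R = '23456789TJQKA'
-- RANK = {card: rank for rank, card in enumerate(CARDS_R)}
--
-- def trial_hands(hand):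
--     # Presence table indexed by rank instead of set + comparison sort:
--     # mark which ranks occur, then walk the ranks in order.
--     present = [False] * len(CARDS_R)
--     for card in hand:
--         present[RANK[card]] = True
--     for rank, card in enumerate(CARDS_R):
--         if card != 'J' and present[rank]:
--             yield hand.replace('J', card)
-- ===== Notes on version B (the rewrite author's own statement) =====
-- stated objective: alternative
-- what changed: Instead of building set(hand minus J) and comparison-sorting it by repeated CARDS_R.index lookups, B marks a 13-slot presence table indexed by a precomputed rank and walks the ranks in order, so the set and the sort disappear.
import Mathlib
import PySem

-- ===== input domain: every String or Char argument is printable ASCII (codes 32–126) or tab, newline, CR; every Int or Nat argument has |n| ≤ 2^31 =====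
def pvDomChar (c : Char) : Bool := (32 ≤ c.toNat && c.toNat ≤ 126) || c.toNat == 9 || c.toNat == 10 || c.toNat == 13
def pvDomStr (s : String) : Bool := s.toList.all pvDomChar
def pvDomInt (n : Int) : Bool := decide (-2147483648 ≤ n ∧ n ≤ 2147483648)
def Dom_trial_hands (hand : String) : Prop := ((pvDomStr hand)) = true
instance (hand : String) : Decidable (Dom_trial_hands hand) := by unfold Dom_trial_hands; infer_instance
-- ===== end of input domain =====

-- B replaces A's build-set-then-sort-by-index with a rank-indexed presence table walked
-- in rank order (alternative algorithm; same return values; A is a generator, compared as a list).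

-- ===== PORT A =====
def pvCARDS_R : List Char := "23456789TJQKA".toList

def trial_hands (hand : String) : List String :=
  -- CARDS_R.index(card) raises ValueError off CARDS_R; the total form with getD is
  -- exact under Pre_trial_hands, where the default branch is never taken.
  let availableCards := PySem.List.sorted
    (PySem.Set.ofList (PySem.Chars.replace hand.toList ['J'] []))
    (fun card => (PySem.List.index? pvCARDS_R card).getD pvCARDS_R.length) false
  availableCards.map (fun card => String.ofList (PySem.Chars.replace hand.toList ['J'] [card]))

-- ===== PORT B =====
def pvRANK : PySem.Dict Char Int :=
  (PySem.List.enumerate pvCARDS_R).foldl (fun d rc => PySem.Dict.insert d rc.2 rc.1) (PySem.Dict.empty)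

-- RANK[card] raises KeyError off CARDS_R; the total form with getD is exact under
-- Pre_trial_hands, where the key is always present.
def pvRank (card : Char) : Int := (PySem.Dict.get? pvRANK card).getD 0

def trial_hands_alt (hand : String) : List String :=
  -- present[rank] reads are always in range (every rank is < 13 = len present)
  let present := hand.toList.foldl
    (fun p card => PySem.List.pySetD p (pvRank card) true)
    (List.replicate pvCARDS_R.length false)
  (PySem.List.enumerate pvCARDS_R).foldl (fun out rc =>
    if rc.2 != 'J' && PySem.List.pyGetD present rc.1 false then
      out ++ [String.ofList (PySem.Chars.replace hand.toList ['J'] [rc.2])]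
    else out) []

-- ===== PRECONDITION & SPEC =====
-- Pre_ excludes hands containing a character outside CARDS_R: there A's sort key
-- CARDS_R.index raises ValueError (and B's RANK[card] raises KeyError).
def Pre_trial_hands (hand : String) : Prop := (hand.toList.all (fun c => pvCARDS_R.contains c)) = true
instance (hand : String) : Decidable (Pre_trial_hands hand) := by unfold Pre_trial_hands; infer_instance
def pvWitness_trial_hands : String := "AJ23"

def Spec_trial_hands (hand : String) (out : List String) : Prop := out = trial_hands_alt hand
instance (hand : String) (out : List String) : Decidable (Spec_trial_hands hand out) := by unfold Spec_trial_hands; infer_instance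

-- ===== CLAIM (what is proved, stated in full; the proofs are below) =====
def Claim_equal_trial_hands : Prop := ∀ (hand : String), Dom_trial_hands hand → Pre_trial_hands hand → Spec_trial_hands hand (trial_hands hand)

-- ===== LEMMAS AND PROOFS =====

-- single-char replace-by-empty is filter
lemma replace_go_single_del (a : Char) :
    ∀ (l : List Char) (fuel : Nat) (acc : List Char), l.length ≤ fuel →
      PySem.Chars.replace.go [a] [] fuel l acc = acc.reverse ++ l.filter (fun c => c != a) := by
  intro l
  induction l with
  | nil =>
    intro fuel acc _
    cases fuel <;> simp [PySem.Chars.replace.go]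
  | cons c t ih =>
    intro fuel acc hf
    cases fuel with
    | zero => simp at hf
    | succ f =>
      by_cases hca : a = c
      · subst hca
        simp only [PySem.Chars.replace.go, List.isPrefixOf, BEq.rfl, Bool.true_and, if_pos]
        simpa using ih f acc (by simpa using Nat.le_of_succ_le_succ hf)
      · have hpre : [a].isPrefixOf (c :: t) = false := by
          simp [List.isPrefixOf, hca]
        simp only [PySem.Chars.replace.go, hpre, Bool.false_eq_true, if_neg, not_false_iff]
        rw [ih f (c :: acc) (Nat.le_of_succ_le_succ hf)]
        have : (c != a) = true := by simp [Ne.symm hca]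
        simp [this]

lemma replace_single_del (a : Char) (s : List Char) :
    PySem.Chars.replace s [a] [] = s.filter (fun c => c != a) := by
  simp only [PySem.Chars.replace, List.isEmpty]
  exact replace_go_single_del a s s.length [] le_rfl

lemma cards_nodup : pvCARDS_R.Nodup := by decide

lemma cards_pairwise :
    pvCARDS_R.Pairwise (fun a b =>
      (PySem.List.index? pvCARDS_R a).getD pvCARDS_R.length <
      (PySem.List.index? pvCARDS_R b).getD pvCARDS_R.length) := by decide

-- A's result characterised: under Pre_, the sorted distinct non-J cards of the hand
-- are exactly the cards of the fixed alphabet that occur in the hand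
lemma sorted_cards_eq (hand : String) (hpre : ∀ c ∈ hand.toList, c ∈ pvCARDS_R) :
    PySem.List.sorted (PySem.Set.ofList (hand.toList.filter (fun c => c != 'J')))
        (fun card => (PySem.List.index? pvCARDS_R card).getD pvCARDS_R.length) false
      = pvCARDS_R.filter (fun c => c != 'J' && hand.toList.contains c) := by
  apply PySem.List.sorted_eq_of_perm_of_pairwise_lt
  · rw [List.perm_ext_iff_of_nodup (List.Nodup.filter _ cards_nodup)
      (PySem.Set.nodup_ofList _)]
    intro a
    rw [PySem.Set.mem_ofList]
    simp only [List.mem_filter, Bool.and_eq_true, bne_iff_ne, ne_eq, List.contains_iff_mem]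
    constructor
    · rintro ⟨_, hne, hin⟩
      exact ⟨hin, by simpa using hne⟩
    · rintro ⟨hin, hne⟩
      exact ⟨hpre a hin, by simpa using hne, hin⟩
  · exact cards_pairwise.sublist List.filter_sublist

-- rank facts on the concrete alphabet (Bool forms so 'decide' evaluates shallowly)
lemma rank_bounds_b :
    (pvCARDS_R.all (fun c => decide (0 ≤ pvRank c) && decide (pvRank c < 13))) = true := by decide

lemma rank_eq_iff_b :
    (pvCARDS_R.all (fun c => (PySem.List.enumerate pvCARDS_R).all
      (fun rc => (pvRank c == rc.1) == (c == rc.2)))) = true := by decide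

lemma enum_facts_b :
    ((PySem.List.enumerate pvCARDS_R).all
      (fun rc => decide (0 ≤ rc.1) && decide (rc.1 < 13) && pvCARDS_R.contains rc.2)) = true := by decide

lemma enum_snd : (PySem.List.enumerate pvCARDS_R).map (·.2) = pvCARDS_R := by decide

lemma rank_bounds : ∀ c ∈ pvCARDS_R, 0 ≤ pvRank c ∧ pvRank c < 13 := by
  intro c hc
  have h := List.all_eq_true.mp rank_bounds_b c hc
  simp only [Bool.and_eq_true, decide_eq_true_eq] at h
  exact h

lemma rank_eq_iff : ∀ c ∈ pvCARDS_R, ∀ rc ∈ PySem.List.enumerate pvCARDS_R,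
    (pvRank c == rc.1) = (c == rc.2) := by
  intro c hc rc hrc
  exact beq_iff_eq.mp (List.all_eq_true.mp (List.all_eq_true.mp rank_eq_iff_b c hc) rc hrc)

lemma enum_facts : ∀ rc ∈ PySem.List.enumerate pvCARDS_R,
    0 ≤ rc.1 ∧ rc.1 < 13 ∧ rc.2 ∈ pvCARDS_R := by
  intro rc hrc
  have h := List.all_eq_true.mp enum_facts_b rc hrc
  simp only [Bool.and_eq_true, decide_eq_true_eq, List.contains_iff_mem] at h
  exact ⟨h.1.1, h.1.2, h.2⟩

-- the marking loop: slot r of the presence table is set iff some card of xs has rank r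
lemma present_spec :
    ∀ (xs : List Char) (l : List Bool),
      (∀ c ∈ xs, 0 ≤ pvRank c ∧ pvRank c < (l.length : Int)) →
      ∀ (r : Int), 0 ≤ r →
        PySem.List.pyGetD
            (xs.foldl (fun p card => PySem.List.pySetD p (pvRank card) true) l) r false
          = (PySem.List.pyGetD l r false || xs.any (fun c => pvRank c == r)) := by
  intro xs
  induction xs with
  | nil => intro l _ r _; simp
  | cons c t ih =>
    intro l hb r hr
    simp only [List.foldl_cons, List.any_cons]
    have hc := hb c (List.mem_cons_self)
    rw [ih (PySem.List.pySetD l (pvRank c) true)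
        (by intro x hx; simpa [PySem.List.length_pySetD] using hb x (List.mem_cons_of_mem _ hx)) r hr]
    rw [PySem.List.pySetD_of_nonneg l true hc.1]
    by_cases hrc : r = pvRank c
    · have h1 : (pvRank c == r) = true := by simp [hrc]
      have hgd : PySem.List.pyGetD (l.set (pvRank c).toNat true) r false = true := by
        rw [PySem.List.pyGetD_eq_getElem _ _ hr (by simp; omega)]
        have hnat : r.toNat = (pvRank c).toNat := by omega
        have hlt : (pvRank c).toNat < l.length := by omega
        simp [hnat]
      simp [hgd, h1]
    · have h1 : (pvRank c == r) = false := by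
        simp only [beq_eq_false_iff_ne, ne_eq]
        omega
      have hgd : PySem.List.pyGetD (l.set (pvRank c).toNat true) r false
          = PySem.List.pyGetD l r false := by
        by_cases hin : r < (l.length : Int)
        · rw [PySem.List.pyGetD_eq_getElem _ _ hr (by simp; omega),
              PySem.List.pyGetD_eq_getElem _ _ hr hin]
          simp only [List.getElem_set]
          rw [if_neg (by omega)]
        · rw [PySem.List.pyGetD_of_nonneg _ _ hr, PySem.List.pyGetD_of_nonneg _ _ hr]
          rw [List.getD_eq_getElem?_getD, List.getD_eq_getElem?_getD,
              List.getElem?_eq_none (by simp; omega), List.getElem?_eq_none (by omega)]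
      simp [hgd, h1]

-- the emitting loop over enumerate, with the presence test replaced pointwise
lemma emit_loop (f : Char → String) (P : Int → Bool) (Q : Char → Bool) :
    ∀ (rcs : List (Int × Char)) (acc : List String),
      (∀ rc ∈ rcs, ((rc.2 != 'J') && P rc.1) = ((rc.2 != 'J') && Q rc.2)) →
      rcs.foldl (fun out rc => if rc.2 != 'J' && P rc.1 then out ++ [f rc.2] else out) acc
        = acc ++ ((rcs.map (·.2)).filter (fun c => c != 'J' && Q c)).map f := by
  intro rcs
  induction rcs with
  | nil => intro acc _; simp
  | cons rc t ih =>
    intro acc h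
    simp only [List.foldl_cons, List.map_cons, List.filter_cons]
    rw [h rc (List.mem_cons_self)]
    by_cases hq : ((rc.2 != 'J') && Q rc.2) = true
    · rw [if_pos hq, ih _ (fun x hx => h x (List.mem_cons_of_mem _ hx))]
      simp [hq]
    · rw [if_neg hq, ih _ (fun x hx => h x (List.mem_cons_of_mem _ hx))]
      simp [eq_false_of_ne_true hq]

lemma any_congr_mem {α : Type} (l : List α) (p q : α → Bool)
    (h : ∀ a ∈ l, p a = q a) : l.any p = l.any q := by
  induction l with
  | nil => rfl
  | cons a t ih =>
    simp only [List.any_cons, h a (List.mem_cons_self),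
      ih (fun x hx => h x (List.mem_cons_of_mem _ hx))]

-- ===== VERDICT (by name: the statement is the Claim_ definition above) =====
theorem trial_hands_spec : Claim_equal_trial_hands := by
  intro hand _ hpre0
  unfold Pre_trial_hands at hpre0
  simp only [List.all_eq_true, List.contains_iff_mem] at hpre0
  have hpre : ∀ c ∈ hand.toList, c ∈ pvCARDS_R := hpre0
  unfold Spec_trial_hands trial_hands trial_hands_alt
  rw [replace_single_del, sorted_cards_eq hand hpre]
  show (pvCARDS_R.filter (fun c => c != 'J' && hand.toList.contains c)).map
      (fun card => String.ofList (PySem.Chars.replace hand.toList ['J'] [card]))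
    = (PySem.List.enumerate pvCARDS_R).foldl (fun out rc =>
        if rc.2 != 'J' && PySem.List.pyGetD
            (hand.toList.foldl (fun p card => PySem.List.pySetD p (pvRank card) true)
              (List.replicate pvCARDS_R.length false)) rc.1 false then
          out ++ [String.ofList (PySem.Chars.replace hand.toList ['J'] [rc.2])]
        else out) []
  rw [emit_loop (fun card => String.ofList (PySem.Chars.replace hand.toList ['J'] [card]))
      (fun r => PySem.List.pyGetD
        (hand.toList.foldl (fun p card => PySem.List.pySetD p (pvRank card) true)
          (List.replicate pvCARDS_R.length false)) r false)
      (fun c => hand.toList.contains c) (PySem.List.enumerate pvCARDS_R) []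
      ?_]
  · rw [enum_snd]; simp
  · intro rc hrc
    obtain ⟨hr0, hr13, hmem⟩ := enum_facts rc hrc
    congr 1
    show PySem.List.pyGetD
        (hand.toList.foldl (fun p card => PySem.List.pySetD p (pvRank card) true)
          (List.replicate pvCARDS_R.length false)) rc.1 false
      = hand.toList.contains rc.2
    -- the presence slot rc.1 is set iff the card rc.2 occurs in the hand
    rw [present_spec hand.toList (List.replicate pvCARDS_R.length false)
        (by intro c hc
            refine ⟨(rank_bounds c (hpre c hc)).1, ?_⟩
            have h2 := (rank_bounds c (hpre c hc)).2
            simp only [List.length_replicate]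
            have h13 : pvCARDS_R.length = 13 := rfl
            omega) rc.1 hr0]
    have hrep : PySem.List.pyGetD (List.replicate pvCARDS_R.length false) rc.1 false = false := by
      rw [PySem.List.pyGetD_of_nonneg _ _ hr0]
      simp only [List.getD_eq_getElem?_getD, List.getElem?_replicate]
      split <;> rfl
    rw [hrep, Bool.false_or]
    rw [any_congr_mem hand.toList _ (fun c => c == rc.2)
        (fun c hc => rank_eq_iff c (hpre c hc) rc hrc)]
    refine Bool.eq_iff_iff.mpr ?_
    rw [List.any_eq_true, List.contains_iff_mem]
    constructor
    · rintro ⟨x, hx, he⟩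
      exact (beq_iff_eq.mp he) ▸ hx
    · intro hx
      exact ⟨rc.2, hx, beq_iff_eq.mpr rfl⟩
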